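-- pv_equiv track=rewrite | github.com/tobiasocula/Computeranalysis | computeranalysis/computeranalysis.py | addition_check
-- ===== SOURCE A (Python) =====
-- def addition_check(string, index):
--     left = string[:index]
--     right = string[index+1:]
--     leftbrackets = rightbrackets = 0
--     for innerchar in left[::-1]:
--         if innerchar == ')':
--             leftbrackets += 1
--         elif innerchar == '(':
--             rightbrackets += 1
--         if leftbrackets < rightbrackets:
--             raise AssertionError()
--
--     leftbrackets = rightbrackets = 0
--     for innerchar in right:
--         if innerchar == ')':
--             leftbrackets += 1
--         elif innerchar == '(':
--             rightbrackets += 1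
--         if leftbrackets > rightbrackets:
--             raise AssertionError()
--
--     return left, right
-- ===== SOURCE B (Python) =====
-- def _residue(s):
--     t = ''.join(c for c in s if c in '()')
--     while '()' in t:
--         t = t.replace('()', '')
--     return t
--
--
-- def addition_check(string, index):
--     left = string[:index]
--     right = string[index + 1:]
--     if '(' in _residue(left):
--         raise AssertionError()
--     if ')' in _residue(right):
--         raise AssertionError()
--     return left, right
-- ===== Notes on version B (the rewrite author's own statement) =====
-- stated objective: alternative
-- what changed: A scans each side once with two counters and an in-loop balance check with early raise; B instead rewrites each side to a normal form by repeatedly deleting matched '()' pairs (after dropping non-bracket characters) and raises iff the left residue still contains '(' or the right residue still contains ')'.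
import Mathlib
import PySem

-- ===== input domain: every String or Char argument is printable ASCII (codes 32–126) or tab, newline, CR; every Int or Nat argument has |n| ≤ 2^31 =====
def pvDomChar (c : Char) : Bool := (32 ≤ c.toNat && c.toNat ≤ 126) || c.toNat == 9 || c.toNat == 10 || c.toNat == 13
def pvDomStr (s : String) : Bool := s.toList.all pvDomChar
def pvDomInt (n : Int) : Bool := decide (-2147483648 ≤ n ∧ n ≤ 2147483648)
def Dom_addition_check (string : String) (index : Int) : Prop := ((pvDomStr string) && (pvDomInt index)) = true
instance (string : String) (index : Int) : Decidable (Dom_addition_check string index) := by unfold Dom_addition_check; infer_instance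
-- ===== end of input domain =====

-- B replaces A's counter loops by rewriting each side to a bracket normal form (repeatedly deleting
-- matched '()' pairs) and inspecting the residue (alternative algorithm, same return value).

-- ===== PORT A =====
-- first loop of A: counters over left[::-1]; 'false' marks the AssertionError path (excluded by Pre_)
def pvLeftLoop : List Char → Int → Int → Bool
  | [], _, _ => true
  | innerchar :: rest, leftbrackets, rightbrackets =>
    let leftbrackets := if innerchar = ')' then leftbrackets + 1 else leftbrackets
    let rightbrackets := if innerchar = '(' then rightbrackets + 1 else rightbrackets
    if leftbrackets < rightbrackets then false
    else pvLeftLoop rest leftbrackets rightbrackets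

-- second loop of A: same counters over right, raising when leftbrackets > rightbrackets
def pvRightLoop : List Char → Int → Int → Bool
  | [], _, _ => true
  | innerchar :: rest, leftbrackets, rightbrackets =>
    let leftbrackets := if innerchar = ')' then leftbrackets + 1 else leftbrackets
    let rightbrackets := if innerchar = '(' then rightbrackets + 1 else rightbrackets
    if rightbrackets < leftbrackets then false
    else pvRightLoop rest leftbrackets rightbrackets

def addition_check (string : String) (index : Int) : String × String :=
  let left := PySem.Str.slice string none (some index)
  let right := PySem.Str.slice string (some (index + 1)) none
  -- left[::-1]: slice with step -1 (PySem.List.slice?; never none for step -1)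
  if pvLeftLoop ((PySem.List.slice? left.toList none none (-1)).getD []) 0 0 then
    if pvRightLoop right.toList 0 0 then (left, right)
    else ("", "")  -- AssertionError path, excluded by Pre_
  else ("", "")    -- AssertionError path, excluded by Pre_

-- ===== PORT B =====
-- Source B: ''.join(c for c in s if c in '()')
def pvFilt (l : List Char) : List Char := l.filter (fun c => c == '(' || c == ')')

-- Source B: t.replace('()', '') — one left-to-right pass replacing non-overlapping occurrences (exact
-- for the 2-char pattern '()')
def pvRepl : List Char → List Char
  | [] => []
  | [c] => [c]
  | c1 :: c2 :: rest => if c1 = '(' ∧ c2 = ')' then pvRepl rest else c1 :: pvRepl (c2 :: rest)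

-- Source B: '()' in t — substring test, exact for the 2-char pattern
def pvContainsPair : List Char → Bool
  | c1 :: c2 :: rest => (c1 = '(' && c2 = ')') || pvContainsPair (c2 :: rest)
  | _ => false

-- termination of the while loop: each replace round shortens the string (cited by pvReduce)
theorem pvRepl_length_le (l : List Char) : (pvRepl l).length ≤ l.length := by
  induction l using pvRepl.induct with
  | case1 => simp [pvRepl]
  | case2 c => simp [pvRepl]
  | case3 c1 c2 rest h ih => simp only [pvRepl, if_pos h]; simp; omega
  | case4 c1 c2 rest h ih => simp only [pvRepl, if_neg h]; simp at ih ⊢; omega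

theorem pvRepl_length_lt (l : List Char) (h : pvContainsPair l = true) :
    (pvRepl l).length < l.length := by
  induction l using pvRepl.induct with
  | case1 => simp [pvContainsPair] at h
  | case2 c => simp [pvContainsPair] at h
  | case3 c1 c2 rest hp ih =>
    simp only [pvRepl, if_pos hp]
    have := pvRepl_length_le rest
    simp; omega
  | case4 c1 c2 rest hp ih =>
    have hc : pvContainsPair (c2 :: rest) = true := by
      simp only [pvContainsPair, Bool.or_eq_true, Bool.and_eq_true, decide_eq_true_eq] at h
      rcases h with h | h
      · exact absurd h hp
      · exact h
    simp only [pvRepl, if_neg hp]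
    have := ih hc
    simp at this ⊢; omega

-- Source B: while '()' in t: t = t.replace('()', '')
def pvReduce (l : List Char) : List Char :=
  if h : pvContainsPair l = true then pvReduce (pvRepl l) else l
termination_by l.length
decreasing_by exact pvRepl_length_lt l h

def pvResidue (s : String) : List Char := pvReduce (pvFilt s.toList)

def addition_check_alt (string : String) (index : Int) : String × String :=
  let left := PySem.Str.slice string none (some index)
  let right := PySem.Str.slice string (some (index + 1)) none
  if (pvResidue left).contains '(' then ("", "")       -- raise, excluded by Pre_
  else if (pvResidue right).contains ')' then ("", "") -- raise, excluded by Pre_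
  else (left, right)

-- ===== PRECONDITION & SPEC =====
-- Pre_ excludes exactly the inputs on which A raises AssertionError (an unbalanced bracket prefix
-- on either side of the split); B raises AssertionError on exactly the same inputs.
def Pre_addition_check (string : String) (index : Int) : Prop :=
  let L := (PySem.Chars.slice string.toList none (some index)).reverse
  let R := PySem.Chars.slice string.toList (some (index + 1)) none
  (∀ k, k ≤ L.length → (L.take k).countP (fun c => c = '(') ≤ (L.take k).countP (fun c => c = ')')) ∧
  (∀ k, k ≤ R.length → (R.take k).countP (fun c => c = ')') ≤ (R.take k).countP (fun c => c = '('))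
instance (string : String) (index : Int) : Decidable (Pre_addition_check string index) := by
  unfold Pre_addition_check; infer_instance

def pvWitness_addition_check : String × Int := ("(1)+(2)", 3)

def Spec_addition_check (string : String) (index : Int) (out : String × String) : Prop := out = addition_check_alt string index
instance (string : String) (index : Int) (out : String × String) : Decidable (Spec_addition_check string index out) := by unfold Spec_addition_check; infer_instance

-- ===== CLAIM (what is proved, stated in full; the proofs are below) =====
def Claim_equal_addition_check : Prop := ∀ (string : String) (index : Int), Dom_addition_check string index → Pre_addition_check string index → Spec_addition_check string index (addition_check string index)

-- ===== LEMMAS AND PROOFS =====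
-- the bracket increment both programs are governed by: +1 for ')', -1 for '(', 0 otherwise
def pvStepC (c : Char) : Int := if c = ')' then 1 else if c = '(' then -1 else 0

def pvDiff (l : List Char) : Int := (l.map pvStepC).sum

theorem pvDiff_nil : pvDiff [] = 0 := rfl

theorem pvDiff_cons (c : Char) (l : List Char) : pvDiff (c :: l) = pvStepC c + pvDiff l := by
  simp [pvDiff]

theorem pvDiff_reverse (l : List Char) : pvDiff l.reverse = pvDiff l := by
  simp [pvDiff]

theorem pvCounterDiff (c : Char) (lb rb : Int) :
    (if c = ')' then lb + 1 else lb) - (if c = '(' then rb + 1 else rb) = lb - rb + pvStepC c := by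
  unfold pvStepC
  by_cases h1 : c = ')' <;> by_cases h2 : c = '(' <;> simp [h1, h2] <;> ring

-- unfolding equations of pvRepl (cited by the invariance proofs below)
theorem pvRepl_pair (c1 c2 : Char) (rest : List Char) (h : c1 = '(' ∧ c2 = ')') :
    pvRepl (c1 :: c2 :: rest) = pvRepl rest := by
  simp only [pvRepl, if_pos h]

theorem pvRepl_npair (c1 c2 : Char) (rest : List Char) (h : ¬ (c1 = '(' ∧ c2 = ')')) :
    pvRepl (c1 :: c2 :: rest) = c1 :: pvRepl (c2 :: rest) := by
  simp only [pvRepl, if_neg h]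

-- running-balance forms of the two loop conditions, threaded as an accumulator d
def pvGoodLA (d : Int) : List Char → Bool
  | [] => true
  | c :: rest => (decide (0 ≤ d + pvStepC c)) && pvGoodLA (d + pvStepC c) rest

def pvGoodRA (d : Int) : List Char → Bool
  | [] => true
  | c :: rest => (decide (d + pvStepC c ≤ 0)) && pvGoodRA (d + pvStepC c) rest

-- intrinsic left condition: all suffix balances nonnegative
def pvGoodL : List Char → Bool
  | [] => true
  | c :: rest => (decide (0 ≤ pvDiff (c :: rest))) && pvGoodL rest

theorem pvGoodL_cons (c : Char) (l : List Char) :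
    pvGoodL (c :: l) = ((decide (0 ≤ pvDiff (c :: l))) && pvGoodL l) := rfl

theorem pvLeftLoop_eq_LA (m : List Char) : ∀ lb rb : Int,
    pvLeftLoop m lb rb = pvGoodLA (lb - rb) m := by
  induction m with
  | nil => intro lb rb; rfl
  | cons c rest ih =>
    intro lb rb
    simp only [pvLeftLoop, pvGoodLA]
    have hcd := pvCounterDiff c lb rb
    by_cases h : (if c = ')' then lb + 1 else lb) < (if c = '(' then rb + 1 else rb)
    · have hd : ¬ (0 ≤ (lb - rb) + pvStepC c) := by omega
      simp [h, hd]
    · have hd : 0 ≤ (lb - rb) + pvStepC c := by omega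
      rw [if_neg h, ih]
      simp [hd, hcd]

theorem pvRightLoop_eq_RA (m : List Char) : ∀ lb rb : Int,
    pvRightLoop m lb rb = pvGoodRA (lb - rb) m := by
  induction m with
  | nil => intro lb rb; rfl
  | cons c rest ih =>
    intro lb rb
    simp only [pvRightLoop, pvGoodRA]
    have hcd := pvCounterDiff c lb rb
    by_cases h : (if c = '(' then rb + 1 else rb) < (if c = ')' then lb + 1 else lb)
    · have hd : ¬ ((lb - rb) + pvStepC c ≤ 0) := by omega
      simp [h, hd]
    · have hd : (lb - rb) + pvStepC c ≤ 0 := by omega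
      rw [if_neg h, ih]
      simp [hd, hcd]

theorem pvGoodLA_append (xs : List Char) : ∀ (d : Int) (ys : List Char),
    pvGoodLA d (xs ++ ys) = (pvGoodLA d xs && pvGoodLA (d + pvDiff xs) ys) := by
  induction xs with
  | nil => intro d ys; simp [pvGoodLA, pvDiff_nil]
  | cons c rest ih =>
    intro d ys
    simp only [List.cons_append, pvGoodLA, ih, pvDiff_cons, Bool.and_assoc]
    have : d + pvStepC c + pvDiff rest = d + (pvStepC c + pvDiff rest) := by ring
    rw [this]

-- the reversed scan of A's first loop equals the suffix condition
theorem pvGoodLA_reverse (l : List Char) : pvGoodLA 0 l.reverse = pvGoodL l := by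
  induction l with
  | nil => rfl
  | cons c rest ih =>
    rw [List.reverse_cons, pvGoodLA_append, ih]
    show _ = pvGoodL (c :: rest)
    simp only [pvGoodL, pvGoodLA, pvDiff_cons, pvDiff_reverse, zero_add, Bool.and_true]
    rw [Bool.and_comm]
    have : pvDiff rest + pvStepC c = pvStepC c + pvDiff rest := by ring
    rw [this]

theorem pvGoodL_nonneg (l : List Char) (h : pvGoodL l = true) : 0 ≤ pvDiff l := by
  cases l with
  | nil => simp [pvDiff_nil]
  | cons c rest =>
    simp only [pvGoodL, Bool.and_eq_true, decide_eq_true_eq] at h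
    exact h.1

-- balance is invariant under one replace pass (each deleted pair contributes +1-1)
theorem pvDiff_repl (l : List Char) : pvDiff (pvRepl l) = pvDiff l := by
  induction l using pvRepl.induct with
  | case1 => rfl
  | case2 c => rfl
  | case3 c1 c2 rest h ih =>
    rw [pvRepl_pair _ _ _ h, ih, h.1, h.2, pvDiff_cons, pvDiff_cons]
    have hs1 : pvStepC '(' = -1 := by decide
    have hs2 : pvStepC ')' = 1 := by decide
    rw [hs1, hs2]; ring
  | case4 c1 c2 rest h ih =>
    rw [pvRepl_npair _ _ _ h, pvDiff_cons, pvDiff_cons, ih]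

theorem pvGoodL_repl (l : List Char) : pvGoodL (pvRepl l) = pvGoodL l := by
  induction l using pvRepl.induct with
  | case1 => rfl
  | case2 c => rfl
  | case3 c1 c2 rest h ih =>
    rw [pvRepl_pair _ _ _ h, ih, h.1, h.2]
    cases hg : pvGoodL rest with
    | false => simp [pvGoodL, hg]
    | true =>
      have hd := pvGoodL_nonneg rest hg
      have hs1 : pvStepC '(' = -1 := by decide
      have hs2 : pvStepC ')' = 1 := by decide
      have h1 : (0:Int) ≤ pvStepC '(' + (pvStepC ')' + pvDiff rest) := by rw [hs1, hs2]; omega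
      have h2 : (0:Int) ≤ pvStepC ')' + pvDiff rest := by rw [hs2]; omega
      simp [pvGoodL, pvDiff_cons, hg, h1, h2]
  | case4 c1 c2 rest h ih =>
    rw [pvRepl_npair _ _ _ h]
    simp only [pvGoodL, ih, pvDiff_cons, pvDiff_repl (c2 :: rest)]

theorem pvGoodRA_repl (l : List Char) : ∀ d : Int, d ≤ 0 →
    pvGoodRA d (pvRepl l) = pvGoodRA d l := by
  induction l using pvRepl.induct with
  | case1 => intro d _; rfl
  | case2 c => intro d _; rfl
  | case3 c1 c2 rest h ih =>
    intro d hd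
    rw [pvRepl_pair _ _ _ h, ih d hd, h.1, h.2]
    have hs1 : pvStepC '(' = -1 := by decide
    have hs2 : pvStepC ')' = 1 := by decide
    simp only [pvGoodRA, hs1, hs2]
    have e : d + -1 + 1 = d := by ring
    rw [e]
    have c1' : d + -1 ≤ 0 := by omega
    simp [c1', hd]
  | case4 c1 c2 rest h ih =>
    intro d hd
    rw [pvRepl_npair _ _ _ h]
    simp only [pvGoodRA]
    by_cases hc : d + pvStepC c1 ≤ 0
    · rw [ih (d + pvStepC c1) hc]
      simp only [pvGoodRA]
    · simp [hc]

theorem pvFilt_cons (c : Char) (l : List Char) :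
    pvFilt (c :: l) = if (c == '(' || c == ')') = true then c :: pvFilt l else pvFilt l := by
  simp [pvFilt, List.filter_cons]

theorem pvStepC_other (c : Char) (hb : (c == '(' || c == ')') = false) : pvStepC c = 0 := by
  simp only [Bool.or_eq_false_iff, beq_eq_false_iff_ne, ne_eq] at hb
  simp [pvStepC, hb.1, hb.2]

-- balance and side conditions are invariant under dropping non-bracket characters (step 0)
theorem pvDiff_filt (l : List Char) : pvDiff (pvFilt l) = pvDiff l := by
  induction l with
  | nil => rfl
  | cons c rest ih =>
    rw [pvFilt_cons]
    by_cases hb : (c == '(' || c == ')') = true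
    · rw [if_pos hb, pvDiff_cons, pvDiff_cons, ih]
    · rw [if_neg hb, pvDiff_cons, pvStepC_other c (by simpa using hb), ih]
      omega

theorem pvGoodL_filt (l : List Char) : pvGoodL (pvFilt l) = pvGoodL l := by
  induction l with
  | nil => rfl
  | cons c rest ih =>
    rw [pvFilt_cons]
    by_cases hb : (c == '(' || c == ')') = true
    · rw [if_pos hb]
      simp only [pvGoodL, ih, pvDiff_cons, pvDiff_filt]
    · rw [if_neg hb, ih]
      have hstep := pvStepC_other c (by simpa using hb)
      cases hg : pvGoodL rest with
      | false => simp [pvGoodL, hg]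
      | true =>
        have hd := pvGoodL_nonneg rest hg
        simp [pvGoodL, hg, pvDiff_cons, hstep]
        omega

theorem pvGoodRA_filt (l : List Char) : ∀ d : Int, d ≤ 0 →
    pvGoodRA d (pvFilt l) = pvGoodRA d l := by
  induction l with
  | nil => intro d _; rfl
  | cons c rest ih =>
    intro d hd
    rw [pvFilt_cons]
    by_cases hb : (c == '(' || c == ')') = true
    · rw [if_pos hb]
      simp only [pvGoodRA]
      by_cases hc : d + pvStepC c ≤ 0
      · rw [ih (d + pvStepC c) hc]
      · simp [hc]
    · rw [if_neg hb, ih d hd]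
      have hstep := pvStepC_other c (by simpa using hb)
      simp only [pvGoodRA, hstep, add_zero]
      simp [hd]

-- side conditions invariant under the whole while loop
theorem pvGoodL_reduce (l : List Char) : pvGoodL (pvReduce l) = pvGoodL l := by
  induction l using pvReduce.induct with
  | case1 l h ih => rw [pvReduce, dif_pos h, ih, pvGoodL_repl]
  | case2 l h => rw [pvReduce, dif_neg h]

theorem pvGoodRA_reduce (l : List Char) : pvGoodRA 0 (pvReduce l) = pvGoodRA 0 l := by
  induction l using pvReduce.induct with
  | case1 l h ih => rw [pvReduce, dif_pos h, ih, pvGoodRA_repl l 0 (by omega)]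
  | case2 l h => rw [pvReduce, dif_neg h]

-- the loop's exit: the residue contains no '()' substring
theorem pvReduce_noPair (l : List Char) : pvContainsPair (pvReduce l) = false := by
  induction l using pvReduce.induct with
  | case1 l h ih => rw [pvReduce, dif_pos h]; exact ih
  | case2 l h => rw [pvReduce, dif_neg h]; simpa using h

def pvBr (l : List Char) : Bool := l.all (fun c => c == '(' || c == ')')

theorem pvBr_filt (l : List Char) : pvBr (pvFilt l) = true := by
  simp only [pvBr, pvFilt, List.all_eq_true]
  intro c hc
  exact (List.mem_filter.mp hc).2

theorem pvBr_repl (l : List Char) (h : pvBr l = true) : pvBr (pvRepl l) = true := by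
  induction l using pvRepl.induct with
  | case1 => rfl
  | case2 c => exact h
  | case3 c1 c2 rest hp ih =>
    rw [pvRepl_pair _ _ _ hp]
    simp only [pvBr, List.all_cons, Bool.and_eq_true] at h
    exact ih h.2.2
  | case4 c1 c2 rest hp ih =>
    rw [pvRepl_npair _ _ _ hp]
    have hrest : pvBr (pvRepl (c2 :: rest)) = true := by
      apply ih
      simp only [pvBr, List.all_cons, Bool.and_eq_true] at h ⊢
      exact ⟨h.2.1, h.2.2⟩
    simp only [pvBr, List.all_cons, Bool.and_eq_true] at h ⊢
    exact ⟨h.1, hrest⟩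

theorem pvBr_reduce (l : List Char) (h : pvBr l = true) : pvBr (pvReduce l) = true := by
  induction l using pvReduce.induct with
  | case1 l hc ih => rw [pvReduce, dif_pos hc]; exact ih (pvBr_repl l h)
  | case2 l hc => rw [pvReduce, dif_neg hc]; exact h

-- a pair-free bracket residue containing '(' fails the left condition (its last char is '(')
theorem pvResidue_open_bad (r : List Char) (hbr : pvBr r = true)
    (hnp : pvContainsPair r = false) (hm : r.contains '(' = true) :
    pvGoodL r = false := by
  induction r with
  | nil => simp at hm
  | cons c rest ih =>
    have hbr' : pvBr rest = true := by
      simp only [pvBr, List.all_cons, Bool.and_eq_true] at hbr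
      exact hbr.2
    have hnp' : pvContainsPair rest = false := by
      match rest with
      | [] => rfl
      | d :: rest' =>
        simp only [pvContainsPair, Bool.or_eq_false_iff] at hnp
        exact hnp.2
    by_cases hc : c = '('
    · subst hc
      match rest with
      | [] => simp [pvGoodL, pvDiff_cons, pvDiff_nil, pvStepC]
      | d :: rest' =>
        have hd : d = '(' := by
          have hbd : (d == '(' || d == ')') = true := by
            simp only [pvBr, List.all_cons, Bool.and_eq_true] at hbr
            exact hbr.2.1
          have hdne : ¬ (d = ')') := by
            intro hdc
            simp [pvContainsPair, hdc] at hnp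
          simp only [Bool.or_eq_true, beq_iff_eq] at hbd
          tauto
        have hrest : pvGoodL (d :: rest') = false := ih hbr' hnp' (by simp [hd])
        rw [pvGoodL_cons, hrest, Bool.and_false]
    · have hm' : rest.contains '(' = true := by
        simp only [List.contains_cons, Bool.or_eq_true, beq_iff_eq] at hm
        rcases hm with hm | hm
        · exact absurd hm.symm hc
        · simpa using hm
      have hrest : pvGoodL rest = false := ih hbr' hnp' hm'
      rw [pvGoodL_cons, hrest, Bool.and_false]

-- a residue with no '(' passes the left condition
theorem pvDiff_nonneg_of_no_open (l : List Char) (h : l.contains '(' = false) :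
    0 ≤ pvDiff l := by
  induction l with
  | nil => simp [pvDiff_nil]
  | cons c rest ih =>
    simp only [List.contains_cons, Bool.or_eq_false_iff, beq_eq_false_iff_ne, ne_eq] at h
    have h1 : ¬ (c = '(') := fun hc => h.1 hc.symm
    have h2 : rest.contains '(' = false := by
      rcases h with ⟨_, h2⟩
      simpa using h2
    have := ih h2
    have hstep : 0 ≤ pvStepC c := by
      by_cases hA : c = ')'
      · simp [pvStepC, hA]
      · simp [pvStepC, hA, h1]
    rw [pvDiff_cons]; omega

theorem pvResidue_no_open_good (r : List Char) (h : r.contains '(' = false) :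
    pvGoodL r = true := by
  induction r with
  | nil => rfl
  | cons c rest ih =>
    have h2 : rest.contains '(' = false := by
      simp only [List.contains_cons, Bool.or_eq_false_iff] at h
      exact h.2
    have hd : 0 ≤ pvDiff (c :: rest) := pvDiff_nonneg_of_no_open (c :: rest) h
    simp [pvGoodL, hd, ih h2]

-- a pair-free bracket residue containing ')' fails the right condition (its first char is ')')
theorem pvResidue_close_head (r : List Char) (hbr : pvBr r = true)
    (hnp : pvContainsPair r = false) (hm : r.contains ')' = true) :
    ∃ rest, r = ')' :: rest := by
  induction r with
  | nil => simp at hm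
  | cons c rest ih =>
    by_cases hc : c = ')'
    · exact ⟨rest, by rw [hc]⟩
    · have hco : c = '(' := by
        have hbd : (c == '(' || c == ')') = true := by
          simp only [pvBr, List.all_cons, Bool.and_eq_true] at hbr
          exact hbr.1
        simp only [Bool.or_eq_true, beq_iff_eq] at hbd
        tauto
      have hm' : rest.contains ')' = true := by
        simp only [List.contains_cons, Bool.or_eq_true, beq_iff_eq] at hm
        rcases hm with hm | hm
        · exact absurd hm.symm hc
        · simpa using hm
      have hbr' : pvBr rest = true := by
        simp only [pvBr, List.all_cons, Bool.and_eq_true] at hbr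
        exact hbr.2
      have hnp' : pvContainsPair rest = false := by
        match rest with
        | [] => rfl
        | d :: rest' =>
          simp only [pvContainsPair, Bool.or_eq_false_iff] at hnp
          exact hnp.2
      rcases ih hbr' hnp' hm' with ⟨rest', hrest⟩
      exfalso
      rw [hrest, hco] at hnp
      simp [pvContainsPair] at hnp

theorem pvResidue_close_bad (r : List Char) (hbr : pvBr r = true)
    (hnp : pvContainsPair r = false) (hm : r.contains ')' = true) :
    pvGoodRA 0 r = false := by
  rcases pvResidue_close_head r hbr hnp hm with ⟨rest, hr⟩
  rw [hr]
  simp [pvGoodRA, pvStepC]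

-- a residue with no ')' passes the right condition (started nonpositive, steps only down)
theorem pvResidue_no_close_good (r : List Char) (h : r.contains ')' = false) :
    ∀ d : Int, d ≤ 0 → pvGoodRA d r = true := by
  induction r with
  | nil => intro d _; rfl
  | cons c rest ih =>
    intro d hd
    simp only [List.contains_cons, Bool.or_eq_false_iff, beq_eq_false_iff_ne, ne_eq] at h
    have h1 : ¬ (c = ')') := fun hc => h.1 hc.symm
    have hstep : pvStepC c ≤ 0 := by
      by_cases hA : c = '('
      · simp [pvStepC, hA]
      · simp [pvStepC, hA, h1]
    have hc : d + pvStepC c ≤ 0 := by omega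
    have h2 : rest.contains ')' = false := by
      rcases h with ⟨_, h2⟩
      simpa using h2
    simp [pvGoodRA, hc, ih h2 (d + pvStepC c) hc]

-- the two sides assembled: A's loops equal B's residue tests (as Booleans)
theorem pvLeft_main (l : List Char) :
    pvLeftLoop l.reverse 0 0 = !((pvReduce (pvFilt l)).contains '(') := by
  have hres : pvGoodL (pvReduce (pvFilt l)) = pvGoodL l := by
    rw [pvGoodL_reduce, pvGoodL_filt]
  have hloop : pvLeftLoop l.reverse 0 0 = pvGoodL l := by
    rw [pvLeftLoop_eq_LA]
    simpa using pvGoodLA_reverse l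
  rw [hloop]
  cases hc : (pvReduce (pvFilt l)).contains '(' with
  | true =>
    have hbad : pvGoodL (pvReduce (pvFilt l)) = false :=
      pvResidue_open_bad _ (pvBr_reduce _ (pvBr_filt l)) (pvReduce_noPair _) hc
    rw [hres] at hbad
    simp [hbad]
  | false =>
    have hgood : pvGoodL (pvReduce (pvFilt l)) = true := pvResidue_no_open_good _ hc
    rw [hres] at hgood
    simp [hgood]

theorem pvRight_main (l : List Char) :
    pvRightLoop l 0 0 = !((pvReduce (pvFilt l)).contains ')') := by
  have hres : pvGoodRA 0 (pvReduce (pvFilt l)) = pvGoodRA 0 l := by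
    rw [pvGoodRA_reduce, pvGoodRA_filt l 0 (by omega)]
  have hloop : pvRightLoop l 0 0 = pvGoodRA 0 l := by
    simpa using pvRightLoop_eq_RA l 0 0
  rw [hloop]
  cases hc : (pvReduce (pvFilt l)).contains ')' with
  | true =>
    have hbad : pvGoodRA 0 (pvReduce (pvFilt l)) = false :=
      pvResidue_close_bad _ (pvBr_reduce _ (pvBr_filt l)) (pvReduce_noPair _) hc
    rw [hres] at hbad
    simp [hbad]
  | false =>
    have hgood : pvGoodRA 0 (pvReduce (pvFilt l)) = true :=
      pvResidue_no_close_good _ hc 0 (by omega)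
    rw [hres] at hgood
    simp [hgood]

-- ===== VERDICT (by name: the statement is the Claim_ definition above) =====
theorem addition_check_spec : Claim_equal_addition_check := by
  unfold Claim_equal_addition_check
  intro string index _ _
  unfold Spec_addition_check addition_check addition_check_alt pvResidue
  simp only [PySem.List.slice?_none_none_neg_one, Option.getD_some]
  rw [pvLeft_main, pvRight_main]
  cases h1 : (pvReduce (pvFilt (PySem.Str.slice string none (some index)).toList)).contains '(' <;>
    cases h2 : (pvReduce (pvFilt (PySem.Str.slice string (some (index + 1)) none).toList)).contains ')' <;>
      simp
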